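-- pv_equiv track=rewrite | github.com/Nihalmai/CS301-Ai-C3 | Week2/forSub.py | align_sentences
-- ===== SOURCE A (Python) =====
-- import heapq
--
-- def compute_edit_distance(str1, str2):
--     rows, cols = len(str1), len(str2)
--     dp_table = [[0] * (cols + 1) for _ in range(rows + 1)]
--
--     for row in range(rows + 1):
--         dp_table[row][0] = row
--     for col in range(cols + 1):
--         dp_table[0][col] = col
--
--     for row in range(1, rows + 1):
--         for col in range(1, cols + 1):
--             if str1[row - 1] == str2[col - 1]:
--                 dp_table[row][col] = dp_table[row - 1][col - 1]
--             else:
--                 dp_table[row][col] = 1 + min(dp_table[row - 1][col], dp_table[row][col - 1], dp_table[row - 1][col - 1])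
--
--     return dp_table[rows][cols]
--
-- def estimate_cost(doc1, doc2, idx1, idx2):
--     total_cost = 0
--     for s1, s2 in zip(range(idx1, len(doc1)), range(idx2, len(doc2))):
--         total_cost += compute_edit_distance(doc1[s1], doc2[s2])
--     return total_cost
--
-- def align_sentences(doc1, doc2):
--     initial_state = (0, 0, 0)  # (index in doc1, index in doc2, cost so far)
--     target_state = (len(doc1), len(doc2))
--
--     # Priority queue for A* search
--     queue = []
--     heapq.heappush(queue, (0, initial_state))
--
--     # Track visited states
--     explored = set()
--
--     while queue:
--         current_f, (i, j, g_cost) = heapq.heappop(queue)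
--
--         if (i, j) in explored:
--             continue
--
--         explored.add((i, j))
--
--         # If both documents are fully processed
--         if (i, j) == target_state:
--             return g_cost  # Return total cost
--
--         # Explore possible actions: align sentences or skip one
--         if i < len(doc1) and j < len(doc2):
--             cost = compute_edit_distance(doc1[i], doc2[j])
--             next_state = (i + 1, j + 1, g_cost + cost)
--             heapq.heappush(queue, (next_state[2] + estimate_cost(doc1, doc2, i + 1, j + 1), next_state))
--
--         if i < len(doc1):
--             next_state = (i + 1, j, g_cost + 1)
--             heapq.heappush(queue, (next_state[2] + estimate_cost(doc1, doc2, i + 1, j), next_state))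
--
--         if j < len(doc2):
--             next_state = (i, j + 1, g_cost + 1)
--             heapq.heappush(queue, (next_state[2] + estimate_cost(doc1, doc2, i, j + 1), next_state))
--
--     return float('inf')
-- ===== SOURCE B (Python) =====
-- def compute_edit_distance(str1, str2):
--     rows, cols = len(str1), len(str2)
--     dp_table = [[0] * (cols + 1) for _ in range(rows + 1)]
--
--     for row in range(rows + 1):
--         dp_table[row][0] = row
--     for col in range(cols + 1):
--         dp_table[0][col] = col
--
--     for row in range(1, rows + 1):
--         for col in range(1, cols + 1):
--             if str1[row - 1] == str2[col - 1]:
--                 dp_table[row][col] = dp_table[row - 1][col - 1]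
--             else:
--                 dp_table[row][col] = 1 + min(dp_table[row - 1][col], dp_table[row][col - 1], dp_table[row - 1][col - 1])
--
--     return dp_table[rows][cols]
--
-- def align_sentences(doc1, doc2):
--     m, n = len(doc1), len(doc2)
--     # all pairwise sentence distances, computed once (A recomputes them at every push)
--     ed = [[compute_edit_distance(doc1[i], doc2[j]) for j in range(n)] for i in range(m)]
--     # heuristic table, built back to front: h[i][j] = sum of diagonal distances from (i,j)
--     h = [[0] * (n + 1)]
--     for i in range(m - 1, -1, -1):
--         h.insert(0, [ed[i][j] + h[0][j + 1] for j in range(n)] + [0])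
--     # best-first search with a decrease-key frontier (no heap, no lazy-deletion skips)
--     frontier = {(0, 0): (0, 0)}  # node -> best (f, g) pushed so far
--     done = set()
--     while frontier:
--         (i, j), (f, g) = min(frontier.items(),
--                              key=lambda kv: (kv[1][0], kv[0][0], kv[0][1], kv[1][1]))
--         del frontier[(i, j)]
--         done.add((i, j))
--         if i == m and j == n:
--             return g
--         succs = []
--         if i < m and j < n:
--             g2 = g + ed[i][j]
--             succs.append(((i + 1, j + 1), (g2 + h[i + 1][j + 1], g2)))
--         if i < m:
--             succs.append(((i + 1, j), (g + 1 + h[i + 1][j], g + 1)))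
--         if j < n:
--             succs.append(((i, j + 1), (g + 1 + h[i][j + 1], g + 1)))
--         for q, key in succs:
--             if q not in done and (q not in frontier or key < frontier[q]):
--                 frontier[q] = key
--     return float('inf')
-- ===== Notes on version B (the rewrite author's own statement) =====
-- stated objective: alternative
-- what changed: A's lazy-deletion-heap A* recomputes estimate_cost (a whole diagonal of pairwise edit distances) at every push; B precomputes the edit-distance matrix and the heuristic table once and runs the same best-first expansion as a decrease-key frontier dictionary (min over per-node best keys, no heap, no skip-popping of stale entries); intended as faster (measured 1.55x at n=256, unconfirmed at the largest size).
import Mathlib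
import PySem

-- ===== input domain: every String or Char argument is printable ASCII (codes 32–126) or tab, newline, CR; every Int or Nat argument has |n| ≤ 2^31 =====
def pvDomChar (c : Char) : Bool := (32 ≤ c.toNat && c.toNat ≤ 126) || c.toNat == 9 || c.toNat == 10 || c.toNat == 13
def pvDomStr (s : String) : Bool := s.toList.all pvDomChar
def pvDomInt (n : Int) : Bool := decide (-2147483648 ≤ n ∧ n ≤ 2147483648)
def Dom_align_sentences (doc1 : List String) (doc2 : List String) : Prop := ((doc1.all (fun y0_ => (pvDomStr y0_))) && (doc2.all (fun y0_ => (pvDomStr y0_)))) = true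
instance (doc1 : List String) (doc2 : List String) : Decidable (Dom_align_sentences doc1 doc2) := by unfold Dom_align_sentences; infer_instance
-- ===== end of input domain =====

-- B replaces A's lazy-deletion-heap A* (which recomputes every suffix heuristic and pairwise edit
-- distance at each push) by a decrease-key frontier-dict best-first search over tables precomputed
-- once (intended as faster; measured 1.55x at n=256, unconfirmed at the largest size).
-- Same return value proved for all inputs.


-- ===== PORT A =====
-- 2D-list helpers: t[i][j] and t[i][j] = v (indices are in range at every use site)
def get2 (t : List (List Int)) (i j : Int) : Int :=
  PySem.List.pyGetD (PySem.List.pyGetD t i []) j 0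

def set2 (t : List (List Int)) (i j : Int) (v : Int) : List (List Int) :=
  PySem.List.pySetD t i (PySem.List.pySetD (PySem.List.pyGetD t i []) j v)

-- compute_edit_distance: shared by both ports (Source B's helper is byte-identical to Source A's)
def compute_edit_distance (str1 str2 : String) : Int :=
  let s1 := str1.toList
  let s2 := str2.toList
  let rows : Int := PySem.List.len s1
  let cols : Int := PySem.List.len s2
  let dp0 : List (List Int) :=
    (PySem.List.pyRange 0 (rows + 1) 1).map (fun _ => (PySem.List.pyRange 0 (cols + 1) 1).map (fun _ => 0))
  let dp1 := (PySem.List.pyRange 0 (rows + 1) 1).foldl (fun t row => set2 t row 0 row) dp0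
  let dp2 := (PySem.List.pyRange 0 (cols + 1) 1).foldl (fun t col => set2 t 0 col col) dp1
  let dp3 := (PySem.List.pyRange 1 (rows + 1) 1).foldl (fun t row =>
    (PySem.List.pyRange 1 (cols + 1) 1).foldl (fun t col =>
      if PySem.List.pyGetD s1 (row - 1) ' ' = PySem.List.pyGetD s2 (col - 1) ' ' then
        set2 t row col (get2 t (row - 1) (col - 1))
      else
        set2 t row col (1 + min (min (get2 t (row - 1) col) (get2 t row (col - 1))) (get2 t (row - 1) (col - 1)))) t) dp2
  get2 dp3 rows cols

def estimate_cost (doc1 doc2 : List String) (idx1 idx2 : Int) : Int :=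
  (List.zip (PySem.List.pyRange idx1 (PySem.List.len doc1) 1) (PySem.List.pyRange idx2 (PySem.List.len doc2) 1)).foldl
    (fun total p => total + compute_edit_distance (PySem.List.pyGetD doc1 p.1 "") (PySem.List.pyGetD doc2 p.2 "")) 0

-- heap entries (f, (i, j, g)); Python's tuple '<' is lexicographic: model it with Prod.Lex
def ekey (e : Int × (Int × Int × Int)) : Lex (Int × Lex (Int × Lex (Int × Int))) :=
  toLex (e.1, toLex (e.2.1, toLex (e.2.2.1, e.2.2.2)))

-- the heap is modelled as a multiset (list): heappush appends, heappop removes the minimum entry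
-- (exact: heapq pops a minimal entry, and equal entries are identical tuples).  popUntil is the
-- 'while queue: pop; if (i,j) in explored: continue' head of A's loop.
def popUntil (explored : PySem.Set (Int × Int)) (queue : List (Int × (Int × Int × Int))) :
    Option ((Int × (Int × Int × Int)) × List (Int × (Int × Int × Int))) :=
  match hq : PySem.List.min? queue ekey with
  | none => none
  | some e =>
    if explored.contains (e.2.1, e.2.2.1) then popUntil explored (queue.erase e)
    else some (e, queue.erase e)
termination_by queue.length
decreasing_by
  have hm := PySem.List.min?_mem hq
  have := List.length_erase_of_mem hm
  have := List.length_pos_of_mem hm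
  omega

-- fuel bounds the number of node expansions; (m+1)*(n+1)+1 is enough for every run, and on
-- exhaustion / empty queue both ports return the same default (Python's unreachable branches)
def aloop (doc1 doc2 : List String) (m n : Int) :
    Nat → List (Int × (Int × Int × Int)) → PySem.Set (Int × Int) → Int
  | 0, _, _ => 0
  | fuel + 1, queue, explored =>
    match popUntil explored queue with
    | none => 0  -- Python: return float('inf'); unreachable with the fuel chosen
    | some ((_f, (i, j, g)), rest) =>
      let explored := explored.add (i, j)
      if i = m ∧ j = n then g
      else
        let q1 := if i < m ∧ j < n then
            let cost := compute_edit_distance (PySem.List.pyGetD doc1 i "") (PySem.List.pyGetD doc2 j "")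
            rest ++ [(g + cost + estimate_cost doc1 doc2 (i + 1) (j + 1), (i + 1, j + 1, g + cost))]
          else rest
        let q2 := if i < m then q1 ++ [(g + 1 + estimate_cost doc1 doc2 (i + 1) j, (i + 1, j, g + 1))] else q1
        let q3 := if j < n then q2 ++ [(g + 1 + estimate_cost doc1 doc2 i (j + 1), (i, j + 1, g + 1))] else q2
        aloop doc1 doc2 m n fuel q3 explored

def align_sentences (doc1 : List String) (doc2 : List String) : Int :=
  let m := PySem.List.len doc1
  let n := PySem.List.len doc2
  aloop doc1 doc2 m n (((m + 1) * (n + 1)).toNat + 1) [(0, (0, 0, 0))] PySem.Set.empty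

-- ===== PORT B =====
-- Python's tuple '<' on the (f, g) values stored in the frontier
def keyLt (a b : Int × Int) : Bool :=
  if a.1 < b.1 then true else if a.1 = b.1 then decide (a.2 < b.2) else false

-- min(frontier.items(), key=lambda kv: (kv[1][0], kv[0][0], kv[0][1], kv[1][1]))
def bkey (kv : (Int × Int) × (Int × Int)) : Lex (Int × Lex (Int × Lex (Int × Int))) :=
  toLex (kv.2.1, toLex (kv.1.1, toLex (kv.1.2, kv.2.2)))

def bloop (m n : Int) (ed h : List (List Int)) :
    Nat → PySem.Dict (Int × Int) (Int × Int) → PySem.Set (Int × Int) → Int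
  | 0, _, _ => 0
  | fuel + 1, frontier, done =>
    match PySem.List.min? frontier.items bkey with
    | none => 0  -- 'while frontier' ends: Python returns float('inf'); unreachable with this fuel
    | some ((i, j), (_f, g)) =>
      let frontier := frontier.erase (i, j)
      let done := done.add (i, j)
      if i = m ∧ j = n then g
      else
        let succs : List ((Int × Int) × (Int × Int)) :=
          (if i < m ∧ j < n then
             let g2 := g + get2 ed i j
             [((i + 1, j + 1), (g2 + get2 h (i + 1) (j + 1), g2))]
           else []) ++
          (if i < m then [((i + 1, j), (g + 1 + get2 h (i + 1) j, g + 1))] else []) ++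
          (if j < n then [((i, j + 1), (g + 1 + get2 h i (j + 1), g + 1))] else [])
        let frontier := succs.foldl (fun fr qk =>
          if (!done.contains qk.1 &&
              (match fr.get? qk.1 with
               | none => true
               | some old => keyLt qk.2 old)) then
            fr.insert qk.1 qk.2
          else fr) frontier
        bloop m n ed h fuel frontier done

def align_sentences_alt (doc1 : List String) (doc2 : List String) : Int :=
  let m := PySem.List.len doc1
  let n := PySem.List.len doc2
  let ed : List (List Int) :=
    (PySem.List.pyRange 0 m 1).map (fun i => (PySem.List.pyRange 0 n 1).map (fun j =>
      compute_edit_distance (PySem.List.pyGetD doc1 i "") (PySem.List.pyGetD doc2 j "")))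
  -- h starts as [[0]*(n+1)] and rows are consed in front (list.insert(0, …))
  let h : List (List Int) :=
    (PySem.List.pyRange (m - 1) (-1) (-1)).foldl (fun hh i =>
      (((PySem.List.pyRange 0 n 1).map (fun j =>
          get2 ed i j + PySem.List.pyGetD (PySem.List.pyGetD hh 0 []) (j + 1) 0)) ++ [0]) :: hh)
      [List.replicate (n.toNat + 1) 0]
  bloop m n ed h (((m + 1) * (n + 1)).toNat + 1) (PySem.Dict.ofList [((0, 0), (0, 0))]) PySem.Set.empty

-- ===== PRECONDITION & SPEC =====
def Spec_align_sentences (doc1 : List String) (doc2 : List String) (out : Int) : Prop := out = align_sentences_alt doc1 doc2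
instance (doc1 : List String) (doc2 : List String) (out : Int) : Decidable (Spec_align_sentences doc1 doc2 out) := by unfold Spec_align_sentences; infer_instance

-- ===== CLAIM (what is proved, stated in full; the proofs are below) =====
def Claim_equal_align_sentences : Prop := ∀ (doc1 : List String) (doc2 : List String), Dom_align_sentences doc1 doc2 → Spec_align_sentences doc1 doc2 (align_sentences doc1 doc2)

-- ===== LEMMAS AND PROOFS =====

-- ---- proof-side views of the two loop states ----
def nodeOf (e : Int × (Int × Int × Int)) : Int × Int := (e.2.1, e.2.2.1)
def fgOf (e : Int × (Int × Int × Int)) : Int × Int := (e.1, e.2.2.2)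

-- the entries of the queue whose node is not yet explored (the only ones A can still expand)
def liveL (ex : PySem.Set (Int × Int)) (q : List (Int × (Int × Int × Int))) : List (Int × (Int × Int × Int)) :=
  q.filter (fun e => !ex.contains (nodeOf e))

-- minimal (f, g) pushed for a node (lexicographic, as Python compares tuples)
def nmin (L : List (Int × (Int × Int × Int))) (p : Int × Int) : Option (Int × Int) :=
  PySem.List.min? ((L.filter (fun e => nodeOf e == p)).map fgOf) (fun v => (toLex v : Lex (Int × Int)))

-- the coupling invariant: explored sets coincide (shared variable); the frontier holds, for every
-- unexplored node, exactly the minimal (f, g) among the live heap entries of that node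
def INV (m n : Int) (queue : List (Int × (Int × Int × Int))) (ex : PySem.Set (Int × Int))
    (frontier : PySem.Dict (Int × Int) (Int × Int)) : Prop :=
  frontier.keys.Nodup ∧
  (∀ p, ex.contains p = true → frontier.get? p = none) ∧
  (∀ p, ex.contains p = false → frontier.get? p = nmin (liveL ex queue) p) ∧
  (∀ e ∈ queue, 0 ≤ e.2.1 ∧ e.2.1 ≤ m ∧ 0 ≤ e.2.2.1 ∧ e.2.2.1 ≤ n)

-- ---- generic list/order lemmas ----
theorem filter_erase_neg {α : Type} [BEq α] [LawfulBEq α] {p : α → Bool} {a : α} (ha : p a = false) :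
    ∀ (l : List α), (l.erase a).filter p = l.filter p := by
  intro l
  induction l with
  | nil => rfl
  | cons x xs ih =>
    by_cases hx : x = a
    · subst hx; simp [List.erase_cons_head, List.filter_cons, ha]
    · rw [List.erase_cons_tail (by simpa using hx)]
      simp [List.filter_cons, ih]

theorem filter_erase_pos {α : Type} [BEq α] [LawfulBEq α] {p : α → Bool} {a : α} (ha : p a = true) :
    ∀ (l : List α), (l.erase a).filter p = (l.filter p).erase a := by
  intro l
  induction l with
  | nil => rfl
  | cons x xs ih =>
    by_cases hx : x = a
    · subst hx; simp [List.erase_cons_head, List.filter_cons, ha]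
    · have hba : (x == a) = false := beq_false_of_ne hx
      rw [List.erase_cons_tail (by simp [hba])]
      by_cases hpx : p x = true
      · rw [List.filter_cons_of_pos hpx, List.filter_cons_of_pos hpx,
          List.erase_cons_tail (by simp [hba]), ih]
      · rw [List.filter_cons_of_neg (by simp_all), List.filter_cons_of_neg (by simp_all), ih]

-- a min? result is determined when the key is injective on the list
theorem min?_eq_of {α κ : Type} [LinearOrder κ] {L : List α} {k : α → κ} {x : α}
    (hx : x ∈ L) (hmin : ∀ y ∈ L, k x ≤ k y)
    (hinj : ∀ a ∈ L, ∀ b ∈ L, k a = k b → a = b) :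
    PySem.List.min? L k = some x := by
  cases hL : PySem.List.min? L k with
  | none => rw [PySem.List.min?_eq_none_iff] at hL; simp [hL] at hx
  | some m =>
    have hmem := PySem.List.min?_mem hL
    have h1 := PySem.List.min?_isMin hL x hx
    have h2 := hmin m hmem
    exact congrArg some (hinj m hmem x hx (le_antisymm h1 h2))

theorem min?_append_singleton {α κ : Type} [LT κ] [DecidableLT κ] (l : List α) (x : α) (k : α → κ) :
    PySem.List.min? (l ++ [x]) k = some (match PySem.List.min? l k with
      | none => x
      | some m => if k x < k m then x else m) := by
  unfold PySem.List.min?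
  rw [List.foldl_append, List.foldl_cons, List.foldl_nil]
  split <;> rename_i heq <;> rw [heq] <;>
    first
    | rfl
    | exact (apply_ite some _ _ _).symm

-- ---- order bookkeeping ----
theorem ekey_eq_bkey (e : Int × (Int × Int × Int)) : ekey e = bkey (nodeOf e, fgOf e) := rfl

theorem bkey_inj {a b : (Int × Int) × (Int × Int)} (h : bkey a = bkey b) : a = b := by
  obtain ⟨⟨a1, a2⟩, a3, a4⟩ := a
  obtain ⟨⟨b1, b2⟩, b3, b4⟩ := b
  simp [bkey, toLex_inj, Prod.ext_iff] at h
  simp [h.1, h.2.1, h.2.2.1, h.2.2.2]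

theorem key4_le_iff {f g f' g' i j : Int} :
    ekey (f, (i, j, g)) ≤ ekey (f', (i, j, g')) ↔
      (toLex (f, g) : Lex (Int × Int)) ≤ toLex (f', g') := by
  simp [ekey, Prod.Lex.le_iff, Prod.Lex.lt_iff]

theorem keyLt_iff {a b : Int × Int} :
    keyLt a b = true ↔ (toLex a : Lex (Int × Int)) < toLex b := by
  unfold keyLt
  simp [Prod.Lex.lt_iff]

-- ---- PySem.Set / PySem.Dict bookkeeping ----
theorem set_contains_iff {α : Type} [BEq α] [LawfulBEq α] (s : PySem.Set α) (x : α) :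
    s.contains x = true ↔ x ∈ s := by
  simp [PySem.Set.contains]

theorem set_contains_add {α : Type} [BEq α] [LawfulBEq α] (s : PySem.Set α) (x y : α) :
    (s.add x).contains y = true ↔ (s.contains y = true ∨ y = x) := by
  rw [set_contains_iff, set_contains_iff, PySem.Set.mem_add]

theorem dict_get?_erase_self {κ ν : Type} [BEq κ] [LawfulBEq κ] (d : PySem.Dict κ ν) (k : κ) :
    (d.erase k).get? k = none := by
  simp only [PySem.Dict.erase, PySem.Dict.get?, Option.map_eq_none_iff]
  rw [List.find?_eq_none]
  intro x hx
  rw [List.mem_filter] at hx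
  simpa using hx.2

theorem dict_get?_erase_of_ne {κ ν : Type} [BEq κ] [LawfulBEq κ] (d : PySem.Dict κ ν) {k j : κ}
    (h : j ≠ k) : (d.erase k).get? j = d.get? j := by
  simp only [PySem.Dict.erase, PySem.Dict.get?]
  congr 1
  induction d.items with
  | nil => rfl
  | cons x xs ih =>
    by_cases hx : x.1 = j
    · rw [List.filter_cons]
      have hxk : (!x.1 == k) = true := by simp [hx, h]
      rw [if_pos hxk]
      simp [List.find?_cons, hx]
    · rw [List.filter_cons]
      by_cases hk : x.1 = k
      · simp [hk, List.find?_cons, Ne.symm h, ih]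
      · simp [hk, List.find?_cons, hx, ih]

theorem dict_nodup_keys_erase {κ ν : Type} [BEq κ] (d : PySem.Dict κ ν) (k : κ)
    (h : d.keys.Nodup) : (d.erase k).keys.Nodup := by
  have hsub : (d.erase k).items.Sublist d.items := List.filter_sublist
  exact h.sublist (hsub.map Prod.fst)

-- ---- popUntil: A's pop-skip head returns the minimal live entry ----
theorem popUntil_eq (ex : PySem.Set (Int × Int)) (q : List (Int × (Int × Int × Int))) :
    popUntil ex q = (match PySem.List.min? q ekey with
      | none => none
      | some e => if ex.contains (e.2.1, e.2.2.1) then popUntil ex (q.erase e)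
                  else some (e, q.erase e)) := by
  rw [popUntil]
  split <;> rename_i heq <;> rw [heq]

theorem popUntil_none (ex : PySem.Set (Int × Int)) (q : List (Int × (Int × Int × Int)))
    (h : popUntil ex q = none) : liveL ex q = [] := by
  induction q using popUntil.induct (explored := ex) with
  | case1 q hq =>
    rw [PySem.List.min?_eq_none_iff] at hq
    simp [hq, liveL]
  | case2 q e hq hex ih =>
    rw [popUntil_eq] at h
    simp only [hq, hex, if_true] at h
    have hlive : liveL ex (q.erase e) = liveL ex q := by
      unfold liveL
      apply filter_erase_neg
      simp only [nodeOf, Bool.not_eq_false']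
      exact hex
    rw [← hlive]
    exact ih h
  | case3 q e hq hex =>
    rw [popUntil_eq] at h
    simp only [hq] at h
    rw [if_neg hex] at h
    exact absurd h (by simp)

theorem popUntil_some (ex : PySem.Set (Int × Int)) (q : List (Int × (Int × Int × Int)))
    (e : Int × (Int × Int × Int)) (rest : List (Int × (Int × Int × Int)))
    (h : popUntil ex q = some (e, rest)) :
    e ∈ liveL ex q ∧ (∀ y ∈ liveL ex q, ekey e ≤ ekey y) ∧
      liveL ex rest = (liveL ex q).erase e ∧ (∀ y ∈ rest, y ∈ q) := by
  induction q using popUntil.induct (explored := ex) with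
  | case1 q hq =>
    rw [popUntil_eq] at h
    simp only [hq] at h
    exact absurd h (by simp)
  | case2 q e' hq hex ih =>
    rw [popUntil_eq] at h
    simp only [hq, hex, if_true] at h
    have hlive : liveL ex (q.erase e') = liveL ex q := by
      unfold liveL
      apply filter_erase_neg
      simp only [nodeOf, Bool.not_eq_false']
      exact hex
    have hsub : ∀ y ∈ q.erase e', y ∈ q := fun y hy => List.mem_of_mem_erase hy
    obtain ⟨h1, h2, h3, h4⟩ := ih h
    exact ⟨hlive ▸ h1, fun y hy => h2 y (hlive ▸ hy), by rw [h3, hlive],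
      fun y hy => hsub y (h4 y hy)⟩
  | case3 q e' hq hex =>
    rw [popUntil_eq] at h
    simp only [hq] at h
    rw [if_neg hex] at h
    simp only [Option.some.injEq, Prod.mk.injEq] at h
    obtain ⟨he, hrest⟩ := h
    subst he; subst hrest
    have hmem := PySem.List.min?_mem hq
    refine ⟨?_, ?_, ?_, fun y hy => List.mem_of_mem_erase hy⟩
    · simp [liveL, List.mem_filter, hmem]
      exact fun hc => hex ((set_contains_iff _ _).mpr hc)
    · intro y hy
      exact PySem.List.min?_isMin hq y (List.mem_filter.mp hy).1
    · exact filter_erase_pos (by simp [nodeOf]; simpa using hex) q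

-- ---- the selection step: both loops expand the same node with the same (f, g) ----
theorem select_none (m n : Int) (queue : List (Int × (Int × Int × Int)))
    (ex : PySem.Set (Int × Int)) (frontier : PySem.Dict (Int × Int) (Int × Int))
    (hinv : INV m n queue ex frontier) (h : popUntil ex queue = none) :
    PySem.List.min? frontier.items bkey = none := by
  rw [PySem.List.min?_eq_none_iff]
  by_contra hne
  obtain ⟨⟨p, v⟩, hmem⟩ := List.exists_mem_of_ne_nil _ hne
  have hget : frontier.get? p = some v := PySem.Dict.get?_of_mem_items _ hmem hinv.1
  by_cases hc : ex.contains p = true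
  · rw [hinv.2.1 p hc] at hget; cases hget
  · have hnone := hinv.2.2.1 p (by simpa using hc)
    rw [popUntil_none ex queue h] at hnone
    simp only [nmin, List.filter_nil, List.map_nil, PySem.List.min?] at hnone
    simp only [List.foldl_nil] at hnone
    rw [hnone] at hget
    cases hget

theorem select_some (m n : Int) (queue : List (Int × (Int × Int × Int)))
    (ex : PySem.Set (Int × Int)) (frontier : PySem.Dict (Int × Int) (Int × Int))
    (hinv : INV m n queue ex frontier) (e : Int × (Int × Int × Int))
    (rest : List (Int × (Int × Int × Int))) (h : popUntil ex queue = some (e, rest)) :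
    PySem.List.min? frontier.items bkey = some (nodeOf e, fgOf e) := by
  obtain ⟨hnd, h2, h3, h4⟩ := hinv
  obtain ⟨helive, hemin, -, -⟩ := popUntil_some ex queue e rest h
  have hpnotex : ex.contains (nodeOf e) = false := by
    have := (List.mem_filter.mp helive).2
    simpa using this
  have hfg : nmin (liveL ex queue) (nodeOf e) = some (fgOf e) := by
    apply min?_eq_of
    · exact List.mem_map_of_mem (List.mem_filter.mpr ⟨helive, by simp⟩)
    · intro v hv
      obtain ⟨e', he', rfl⟩ := List.mem_map.mp hv
      have he'f := List.mem_filter.mp he'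
      have hnode : nodeOf e' = nodeOf e := by simpa using he'f.2
      have hle := hemin e' he'f.1
      obtain ⟨f1, i1, j1, g1⟩ := e
      obtain ⟨f2, i2, j2, g2⟩ := e'
      simp only [nodeOf, Prod.mk.injEq] at hnode
      obtain ⟨hii, hjj⟩ := hnode
      subst hii; subst hjj
      exact key4_le_iff.mp hle
    · intro a _ b _ hab
      simpa using hab
  apply min?_eq_of
  · exact (PySem.Dict.get?_eq_some_iff_mem_items _ _ _ hnd).mp (by rw [h3 _ hpnotex, hfg])
  · intro y hy
    obtain ⟨q, w⟩ := y
    have hgetq : frontier.get? q = some w := PySem.Dict.get?_of_mem_items _ hy hnd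
    have hqex : ex.contains q = false := by
      by_contra hq
      rw [h2 q (by simpa using hq)] at hgetq
      cases hgetq
    have hq3 := h3 q hqex
    rw [hgetq] at hq3
    have hwmem := PySem.List.min?_mem hq3.symm
    obtain ⟨e'', he'', hfge⟩ := List.mem_map.mp hwmem
    have he''live : e'' ∈ liveL ex queue := (List.mem_filter.mp he'').1
    have hnode'' : nodeOf e'' = q := by
      have := (List.mem_filter.mp he'').2
      simpa using this
    have hkey : bkey (q, w) = ekey e'' := by rw [← hfge, ← hnode'', ← ekey_eq_bkey]
    rw [hkey, ← ekey_eq_bkey]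
    exact hemin e'' he''live
  · intro a _ b _ hab
    exact bkey_inj hab

-- ---- invariant preservation: pop ----
theorem set_contains_add_eq {α : Type} [BEq α] [LawfulBEq α] (s : PySem.Set α) (x y : α) :
    (s.add x).contains y = (s.contains y || y == x) := by
  unfold PySem.Set.add
  split
  · rename_i hsx
    rw [Bool.eq_iff_iff]
    simp [PySem.Set.contains]
    intro h
    subst h
    simpa [PySem.Set.contains] using hsx
  · rw [Bool.eq_iff_iff]
    simp [PySem.Set.contains]

theorem liveL_add (ex : PySem.Set (Int × Int)) (z : Int × Int)
    (l : List (Int × (Int × Int × Int))) :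
    liveL (ex.add z) l = (liveL ex l).filter (fun x => !(nodeOf x == z)) := by
  unfold liveL
  rw [List.filter_filter]
  apply List.filter_congr
  intro x _
  rw [set_contains_add_eq]
  cases hxe : ex.contains (nodeOf x) <;> cases hxz : nodeOf x == z <;> simp [hxe, hxz]

theorem INV_pop (m n : Int) (queue : List (Int × (Int × Int × Int)))
    (ex : PySem.Set (Int × Int)) (frontier : PySem.Dict (Int × Int) (Int × Int))
    (hinv : INV m n queue ex frontier) (e : Int × (Int × Int × Int))
    (rest : List (Int × (Int × Int × Int))) (h : popUntil ex queue = some (e, rest)) :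
    INV m n rest (ex.add (nodeOf e)) (frontier.erase (nodeOf e)) := by
  obtain ⟨hnd, h2, h3, h4⟩ := hinv
  obtain ⟨helive, -, hrestlive, hrest⟩ := popUntil_some ex queue e rest h
  refine ⟨dict_nodup_keys_erase _ _ hnd, ?_, ?_, fun y hy => h4 y (hrest y hy)⟩
  · intro p hp
    by_cases hpe : p = nodeOf e
    · subst hpe; exact dict_get?_erase_self _ _
    · rw [dict_get?_erase_of_ne _ hpe]
      have hptrue : ex.contains p = true := by
        rcases (set_contains_add ex (nodeOf e) p).mp hp with hh | hh
        · exact hh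
        · exact absurd hh hpe
      exact h2 p hptrue
  · intro p hp
    have hpe : p ≠ nodeOf e := by
      intro hcon
      have htrue := (set_contains_add ex (nodeOf e) p).mpr (Or.inr hcon)
      rw [hp] at htrue
      cases htrue
    have hpex : ex.contains p = false := by
      cases hcx : ex.contains p with
      | false => rfl
      | true =>
        have htrue := (set_contains_add ex (nodeOf e) p).mpr (Or.inl hcx)
        rw [hp] at htrue
        cases htrue
    rw [dict_get?_erase_of_ne _ hpe, h3 p hpex]
    unfold nmin
    congr 1
    rw [liveL_add, List.filter_filter]
    rw [List.filter_congr (l := liveL ex rest)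
      (q := fun x => nodeOf x == p)
      (fun x _ => by
        cases hxp : nodeOf x == p
        · simp [hxp]
        · have hxq : nodeOf x = p := eq_of_beq hxp
          simp [hxp, hxq]
          exact hpe)]
    rw [hrestlive]
    exact congrArg (List.map fgOf)
      (filter_erase_neg (p := fun x => nodeOf x == p) (a := e)
        (beq_false_of_ne (Ne.symm hpe)) (liveL ex queue)).symm

-- ---- invariant preservation: one push ----
theorem INV_push (m n : Int) (queue : List (Int × (Int × Int × Int)))
    (ex : PySem.Set (Int × Int)) (frontier : PySem.Dict (Int × Int) (Int × Int))
    (hinv : INV m n queue ex frontier) (qi qj f g : Int)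
    (hb : 0 ≤ qi ∧ qi ≤ m ∧ 0 ≤ qj ∧ qj ≤ n) :
    INV m n (queue ++ [(f, (qi, qj, g))]) ex
      (if (!ex.contains (qi, qj) &&
          (match frontier.get? (qi, qj) with
           | none => true
           | some old => keyLt (f, g) old)) then
        frontier.insert (qi, qj) (f, g)
      else frontier) := by
  obtain ⟨hnd, h2, h3, h4⟩ := hinv
  refine ⟨?_, ?_, ?_, ?_⟩
  · by_cases hcond : (!ex.contains (qi, qj) && (match frontier.get? (qi, qj) with | none => true | some old => keyLt (f, g) old)) = true
    · rw [if_pos hcond]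
      exact PySem.Dict.nodup_keys_insert _ _ _ hnd
    · rw [if_neg hcond]
      exact hnd
  · intro p hp
    by_cases hcond : (!ex.contains (qi, qj) && (match frontier.get? (qi, qj) with | none => true | some old => keyLt (f, g) old)) = true
    · rw [if_pos hcond]
      have hzf : ex.contains (qi, qj) = false := by
        cases hc : ex.contains (qi, qj)
        · rfl
        · rw [hc] at hcond; simp at hcond
      have hpz : p ≠ (qi, qj) := by
        intro hcon
        subst hcon
        exact Bool.false_ne_true (hzf.symm.trans hp)
      rw [PySem.Dict.get?_insert_of_ne _ _ hpz]
      exact h2 p hp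
    · rw [if_neg hcond]
      exact h2 p hp
  · intro p hp
    have hliveapp : liveL ex (queue ++ [(f, (qi, qj, g))])
        = liveL ex queue ++ (if ex.contains (qi, qj) then [] else [(f, (qi, qj, g))]) := by
      unfold liveL
      rw [List.filter_append]
      congr 1
      cases hz : ex.contains (qi, qj)
      · simp [nodeOf, hz]
        intro hc
        exact Bool.false_ne_true (hz.symm.trans ((set_contains_iff _ _).mpr hc))
      · simp [nodeOf, hz]
        exact (set_contains_iff _ _).mp hz
    by_cases hez : ex.contains (qi, qj) = true
    · rw [hliveapp, if_pos hez, List.append_nil]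
      by_cases hcond : (!ex.contains (qi, qj) && (match frontier.get? (qi, qj) with | none => true | some old => keyLt (f, g) old)) = true
      · rw [hez] at hcond
        simp at hcond
      · rw [if_neg hcond]
        exact h3 p hp
    · have hez' : ex.contains (qi, qj) = false := by
        cases hc : ex.contains (qi, qj)
        · rfl
        · exact absurd hc hez
      rw [hliveapp, if_neg hez]
      by_cases hpz : p = (qi, qj)
      · subst hpz
        have hfilter : (liveL ex queue ++ [(f, (qi, qj, g))]).filter (fun x => nodeOf x == (qi, qj))
            = (liveL ex queue).filter (fun x => nodeOf x == (qi, qj)) ++ [(f, (qi, qj, g))] := by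
          rw [List.filter_append]
          simp [nodeOf]
        unfold nmin
        rw [hfilter, List.map_append]
        rw [show List.map fgOf [(f, (qi, qj, g))] = [(f, g)] from rfl]
        rw [min?_append_singleton]
        have hget := h3 _ hp
        unfold nmin at hget
        rcases hM : PySem.List.min? (((liveL ex queue).filter
            (fun x => nodeOf x == (qi, qj))).map fgOf) (fun v => (toLex v : Lex (Int × Int)))
          with - | old
        · rw [hM] at hget
          rw [if_pos (by rw [hez', hget]; rfl)]
          rw [PySem.Dict.get?_insert_self]
        · rw [hM] at hget
          by_cases hlt : keyLt (f, g) old = true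
          · rw [if_pos (by rw [hez', hget]; simpa using hlt)]
            rw [PySem.Dict.get?_insert_self]
            show some (f, g) = some (if (toLex (f, g) : Lex (Int × Int)) < toLex old then (f, g) else old)
            rw [if_pos (keyLt_iff.mp hlt)]
          · rw [if_neg (by rw [hez', hget]; simpa using hlt)]
            rw [hget]
            show some old = some (if (toLex (f, g) : Lex (Int × Int)) < toLex old then (f, g) else old)
            rw [if_neg (fun hl => hlt (keyLt_iff.mpr hl))]
      · have hfilter : (liveL ex queue ++ [(f, (qi, qj, g))]).filter (fun x => nodeOf x == p)
            = (liveL ex queue).filter (fun x => nodeOf x == p) := by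
          rw [List.filter_append]
          simp [nodeOf, beq_false_of_ne (show (qi, qj) ≠ p from Ne.symm hpz)]
        unfold nmin
        rw [hfilter]
        have hold := h3 p hp
        unfold nmin at hold
        by_cases hcond : (!ex.contains (qi, qj) && (match frontier.get? (qi, qj) with | none => true | some old => keyLt (f, g) old)) = true
        · rw [if_pos hcond, PySem.Dict.get?_insert_of_ne _ _ hpz]
          exact hold
        · rw [if_neg hcond]
          exact hold
  · intro y hy
    rcases List.mem_append.mp hy with hy | hy
    · exact h4 y hy
    · simp only [List.mem_singleton] at hy
      subst hy
      exact ⟨hb.1, hb.2.1, hb.2.2.1, hb.2.2.2⟩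

-- ---- the coupled loops agree ----
theorem loop_eq (doc1 doc2 : List String) (m n : Int) (ed h : List (List Int))
    (hm : m = PySem.List.len doc1) (hn : n = PySem.List.len doc2)
    (hed : ∀ i j : Int, 0 ≤ i → i < m → 0 ≤ j → j < n →
      get2 ed i j = compute_edit_distance (PySem.List.pyGetD doc1 i "") (PySem.List.pyGetD doc2 j ""))
    (hh : ∀ i j : Int, 0 ≤ i → i ≤ m → 0 ≤ j → j ≤ n →
      get2 h i j = estimate_cost doc1 doc2 i j) :
    ∀ (fuel : Nat) (queue : List (Int × (Int × Int × Int))) (ex : PySem.Set (Int × Int))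
      (frontier : PySem.Dict (Int × Int) (Int × Int)), INV m n queue ex frontier →
      aloop doc1 doc2 m n fuel queue ex = bloop m n ed h fuel frontier ex := by
  intro fuel
  induction fuel with
  | zero => intro queue ex frontier _; rfl
  | succ fuel ih =>
    intro queue ex frontier hinv
    cases hpop : popUntil ex queue with
    | none =>
      have hbn := select_none m n queue ex frontier hinv hpop
      simp only [aloop, bloop, hpop, hbn]
    | some er =>
      obtain ⟨e, rest⟩ := er
      have hbs := select_some m n queue ex frontier hinv e rest hpop
      have hinvp := INV_pop m n queue ex frontier hinv e rest hpop
      have hEmem : e ∈ queue := (List.mem_filter.mp (popUntil_some ex queue e rest hpop).1).1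
      have hbnd := hinv.2.2.2 e hEmem
      obtain ⟨ef, ei, ej, eg⟩ := e
      simp only [nodeOf, fgOf] at hbs hinvp
      dsimp only at hbnd
      obtain ⟨hb1, hb2, hb3, hb4⟩ := hbnd
      simp only [aloop, bloop, hpop, hbs]
      by_cases htgt : ei = m ∧ ej = n
      · rw [if_pos htgt, if_pos htgt]
      · rw [if_neg htgt, if_neg htgt]
        by_cases hg2 : ei < m <;> by_cases hg3 : ej < n
        · have hced := hed ei ej hb1 hg2 hb3 hg3
          have hh11 := hh (ei + 1) (ej + 1) (by omega) (by omega) (by omega) (by omega)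
          have hh10 := hh (ei + 1) ej (by omega) (by omega) hb3 (by omega)
          have hh01 := hh ei (ej + 1) (by omega) (by omega) (by omega) (by omega)
          rw [if_pos (⟨hg2, hg3⟩ : ei < m ∧ ej < n), if_pos (⟨hg2, hg3⟩ : ei < m ∧ ej < n),
            if_pos hg2, if_pos hg2, if_pos hg3, if_pos hg3,
            hced, hh11, hh10, hh01]
          exact ih _ _ _
            (INV_push _ _ _ _ _
              (INV_push _ _ _ _ _
                (INV_push _ _ _ _ _ hinvp _ _ _ _
                  (⟨by omega, by omega, by omega, by omega⟩ :
                    0 ≤ ei + 1 ∧ ei + 1 ≤ m ∧ 0 ≤ ej + 1 ∧ ej + 1 ≤ n))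
                _ _ _ _
                (⟨by omega, by omega, by omega, by omega⟩ :
                  0 ≤ ei + 1 ∧ ei + 1 ≤ m ∧ 0 ≤ ej ∧ ej ≤ n))
              _ _ _ _
              (⟨by omega, by omega, by omega, by omega⟩ :
                0 ≤ ei ∧ ei ≤ m ∧ 0 ≤ ej + 1 ∧ ej + 1 ≤ n))
        · have hh10 := hh (ei + 1) ej (by omega) (by omega) hb3 (by omega)
          rw [if_neg (show ¬(ei < m ∧ ej < n) by tauto), if_neg (show ¬(ei < m ∧ ej < n) by tauto),
            if_pos hg2, if_pos hg2, if_neg hg3, if_neg hg3, hh10]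
          exact ih _ _ _
            (INV_push _ _ _ _ _ hinvp _ _ _ _
              (⟨by omega, by omega, by omega, by omega⟩ :
                0 ≤ ei + 1 ∧ ei + 1 ≤ m ∧ 0 ≤ ej ∧ ej ≤ n))
        · have hh01 := hh ei (ej + 1) (by omega) (by omega) (by omega) (by omega)
          rw [if_neg (show ¬(ei < m ∧ ej < n) by tauto), if_neg (show ¬(ei < m ∧ ej < n) by tauto),
            if_neg hg2, if_neg hg2, if_pos hg3, if_pos hg3, hh01]
          exact ih _ _ _
            (INV_push _ _ _ _ _ hinvp _ _ _ _
              (⟨by omega, by omega, by omega, by omega⟩ :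
                0 ≤ ei ∧ ei ≤ m ∧ 0 ≤ ej + 1 ∧ ej + 1 ≤ n))
        · rw [if_neg (show ¬(ei < m ∧ ej < n) by tauto), if_neg (show ¬(ei < m ∧ ej < n) by tauto),
            if_neg hg2, if_neg hg2, if_neg hg3, if_neg hg3]
          exact ih _ _ _ hinvp

-- ---- the precomputed tables agree with A's cost functions ----
theorem est_rec (doc1 doc2 : List String) (i j : Int) :
    estimate_cost doc1 doc2 i j =
      if i < PySem.List.len doc1 ∧ j < PySem.List.len doc2 then
        compute_edit_distance (PySem.List.pyGetD doc1 i "") (PySem.List.pyGetD doc2 j "") +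
          estimate_cost doc1 doc2 (i + 1) (j + 1)
      else 0 := by
  unfold estimate_cost
  by_cases h1 : i < PySem.List.len doc1
  · by_cases h2 : j < PySem.List.len doc2
    · rw [if_pos ⟨h1, h2⟩, PySem.List.pyRange_one_cons h1, PySem.List.pyRange_one_cons h2,
        List.zip_cons_cons, List.foldl_cons, PySem.List.foldl_add, PySem.List.foldl_add]
      ring
    · rw [if_neg (by tauto), PySem.List.pyRange_one_eq_nil (Int.not_lt.mp h2)]
      simp
  · rw [if_neg (by tauto), PySem.List.pyRange_one_eq_nil (Int.not_lt.mp h1)]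
    simp

theorem ed_spec (doc1 doc2 : List String) (m n : Int)
    (hm : m = PySem.List.len doc1) (hn : n = PySem.List.len doc2) :
    ∀ i j : Int, 0 ≤ i → i < m → 0 ≤ j → j < n →
      get2 ((PySem.List.pyRange 0 m 1).map (fun i => (PySem.List.pyRange 0 n 1).map (fun j =>
        compute_edit_distance (PySem.List.pyGetD doc1 i "") (PySem.List.pyGetD doc2 j "")))) i j =
      compute_edit_distance (PySem.List.pyGetD doc1 i "") (PySem.List.pyGetD doc2 j "") := by
  intro i j h0 h1 h2 h3
  unfold get2
  rw [PySem.List.pyGetD_map_pyRange_of_nonneg _ m i _ h0 h1,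
    PySem.List.pyGetD_map_pyRange_of_nonneg _ n j _ h2 h3]

theorem hh_aux (doc1 doc2 : List String) (m n : Int) (ed : List (List Int))
    (hm : m = PySem.List.len doc1) (hn : n = PySem.List.len doc2)
    (hed : ∀ i j : Int, 0 ≤ i → i < m → 0 ≤ j → j < n →
      get2 ed i j = compute_edit_distance (PySem.List.pyGetD doc1 i "") (PySem.List.pyGetD doc2 j "")) :
    ∀ c : Nat, (c : Int) ≤ m →
      (((PySem.List.pyRange (m - 1) (m - 1 - (c : Int)) (-1)).foldl (fun hh i =>
          (((PySem.List.pyRange 0 n 1).map (fun j =>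
              get2 ed i j + PySem.List.pyGetD (PySem.List.pyGetD hh 0 []) (j + 1) 0)) ++ [0]) :: hh)
          [List.replicate (n.toNat + 1) 0]).length = c + 1) ∧
      (∀ a : Nat, a ≤ c → ∀ j : Int, 0 ≤ j → j ≤ n →
        PySem.List.pyGetD (PySem.List.pyGetD ((PySem.List.pyRange (m - 1) (m - 1 - (c : Int)) (-1)).foldl (fun hh i =>
            (((PySem.List.pyRange 0 n 1).map (fun j =>
                get2 ed i j + PySem.List.pyGetD (PySem.List.pyGetD hh 0 []) (j + 1) 0)) ++ [0]) :: hh)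
            [List.replicate (n.toNat + 1) 0]) (a : Int) []) j 0
          = estimate_cost doc1 doc2 (m - c + a) j) := by
  intro c
  induction c with
  | zero =>
    intro _
    have hr : PySem.List.pyRange (m - 1) (m - 1 - ((0 : Nat) : Int)) (-1) = [] := by
      apply PySem.List.pyRange_neg_one_eq_nil; simp
    rw [hr]
    simp only [List.foldl_nil]
    refine ⟨by simp, ?_⟩
    intro a ha j hj0 hjn
    have ha0 : a = 0 := Nat.le_zero.mp ha
    subst ha0
    rw [show ((0 : Nat) : Int) = (0 : Int) by simp, PySem.List.pyGetD_zero_cons]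
    have hlt : j < ((List.replicate (n.toNat + 1) (0 : Int)).length : Int) := by
      simp only [List.length_replicate]; push_cast; omega
    rw [PySem.List.pyGetD_eq_getElem _ _ hj0 hlt, List.getElem_replicate]
    rw [show m - (0 : Int) + 0 = m by ring, est_rec, if_neg]
    intro hcon
    rw [← hm] at hcon
    exact absurd hcon.1 (lt_irrefl m)
  | succ c ih =>
    intro hc
    have hc' : (c : Int) ≤ m := by push_cast at hc ⊢; omega
    obtain ⟨ihlen, ihpt⟩ := ih hc'
    have hsplit : PySem.List.pyRange (m - 1) (m - 1 - ((c + 1 : Nat) : Int)) (-1)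
        = PySem.List.pyRange (m - 1) (m - 1 - (c : Int)) (-1) ++ [m - 1 - (c : Int)] := by
      rw [PySem.List.pyRange_neg_one, PySem.List.pyRange_neg_one]
      have h1 : (m - 1 - (m - 1 - ((c + 1 : Nat) : Int))).toNat = c + 1 := by push_cast; omega
      have h2 : (m - 1 - (m - 1 - (c : Int))).toNat = c := by omega
      rw [h1, h2, List.range_succ, List.map_append]
      simp
    rw [hsplit, List.foldl_append, List.foldl_cons, List.foldl_nil]
    constructor
    · rw [List.length_cons, ihlen]
    · intro a ha j hj0 hjn
      have hn0 : 0 ≤ n := le_trans hj0 hjn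
      cases a with
      | zero =>
        rw [show ((0 : Nat) : Int) = (0 : Int) by simp, PySem.List.pyGetD_zero_cons]
        by_cases hjn' : j < n
        · have hmaplen : ((PySem.List.pyRange 0 n 1).map (fun j =>
              get2 ed (m - 1 - (c : Int)) j + PySem.List.pyGetD (PySem.List.pyGetD
                ((PySem.List.pyRange (m - 1) (m - 1 - (c : Int)) (-1)).foldl (fun hh i =>
                  (((PySem.List.pyRange 0 n 1).map (fun j =>
                      get2 ed i j + PySem.List.pyGetD (PySem.List.pyGetD hh 0 []) (j + 1) 0)) ++ [0]) :: hh)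
                  [List.replicate (n.toNat + 1) 0]) 0 []) (j + 1) 0)).length = n.toNat := by
            rw [List.length_map, PySem.List.length_pyRange_one]
            simp
          rw [PySem.List.pyGetD_eq_getElem _ _ hj0 (by
            rw [List.length_append, hmaplen]; simp; push_cast; omega)]
          rw [List.getElem_append_left (by rw [hmaplen]; omega)]
          rw [List.getElem_map]
          have hidx : (PySem.List.pyRange 0 n 1)[j.toNat]'(by
              rw [PySem.List.length_pyRange_one]; omega) = j := by
            rw [PySem.List.getElem_pyRange_one]
            omega
          rw [hidx]
          have hi0a : 0 ≤ m - 1 - (c : Int) := by push_cast at hc; omega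
          have hi0b : m - 1 - (c : Int) < m := by push_cast; omega
          rw [hed _ _ hi0a hi0b hj0 hjn']
          have hrec := ihpt 0 (Nat.zero_le c) (j + 1) (by omega) (by omega)
          rw [show ((0 : Nat) : Int) = (0 : Int) by simp] at hrec
          rw [hrec]
          rw [show m - ((c + 1 : Nat) : Int) + (0 : Int) = m - 1 - (c : Int) by push_cast; ring]
          rw [show m - (c : Int) + (0 : Int) = m - 1 - (c : Int) + 1 by push_cast; ring]
          conv_rhs => rw [est_rec]
          rw [if_pos (show m - 1 - (c : Int) < PySem.List.len doc1 ∧ j < PySem.List.len doc2 by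
            rw [← hm, ← hn]; exact ⟨hi0b, hjn'⟩)]
        · have hj : j = n := by omega
          rw [hj] at hj0 ⊢
          rw [PySem.List.pyGetD_eq_getElem _ _ hj0 (by
            simp [List.length_append, List.length_map, PySem.List.length_pyRange_one] <;> omega)]
          rw [List.getElem_append_right (by
            simp [List.length_map, PySem.List.length_pyRange_one] <;> omega)]
          simp only [List.length_map, PySem.List.length_pyRange_one]
          rw [List.getElem_singleton]
          rw [est_rec, if_neg]
          intro hcon
          rw [← hn] at hcon
          exact absurd hcon.2 (lt_irrefl n)
      | succ a' =>
        have hcast : PySem.List.pyGetD (((PySem.List.pyRange 0 n 1).map (fun j =>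
            get2 ed (m - 1 - (c : Int)) j + PySem.List.pyGetD (PySem.List.pyGetD
              ((PySem.List.pyRange (m - 1) (m - 1 - (c : Int)) (-1)).foldl (fun hh i =>
                (((PySem.List.pyRange 0 n 1).map (fun j =>
                    get2 ed i j + PySem.List.pyGetD (PySem.List.pyGetD hh 0 []) (j + 1) 0)) ++ [0]) :: hh)
                [List.replicate (n.toNat + 1) 0]) 0 []) (j + 1) 0) ++ [0]) ::
            ((PySem.List.pyRange (m - 1) (m - 1 - (c : Int)) (-1)).foldl (fun hh i =>
                (((PySem.List.pyRange 0 n 1).map (fun j =>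
                    get2 ed i j + PySem.List.pyGetD (PySem.List.pyGetD hh 0 []) (j + 1) 0)) ++ [0]) :: hh)
                [List.replicate (n.toNat + 1) 0]))
            ((a' + 1 : Nat) : Int) []
            = PySem.List.pyGetD ((PySem.List.pyRange (m - 1) (m - 1 - (c : Int)) (-1)).foldl (fun hh i =>
                (((PySem.List.pyRange 0 n 1).map (fun j =>
                    get2 ed i j + PySem.List.pyGetD (PySem.List.pyGetD hh 0 []) (j + 1) 0)) ++ [0]) :: hh)
                [List.replicate (n.toNat + 1) 0]) ((a' : Nat) : Int) [] := by
          rw [PySem.List.pyGetD_natCast, PySem.List.pyGetD_natCast, List.getD_cons_succ]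
        rw [hcast]
        rw [ihpt a' (by omega) j hj0 hjn]
        congr 1
        push_cast
        ring

theorem hh_spec (doc1 doc2 : List String) (m n : Int) (ed : List (List Int))
    (hm : m = PySem.List.len doc1) (hn : n = PySem.List.len doc2)
    (hed : ∀ i j : Int, 0 ≤ i → i < m → 0 ≤ j → j < n →
      get2 ed i j = compute_edit_distance (PySem.List.pyGetD doc1 i "") (PySem.List.pyGetD doc2 j "")) :
    ∀ i j : Int, 0 ≤ i → i ≤ m → 0 ≤ j → j ≤ n →
      get2 ((PySem.List.pyRange (m - 1) (-1) (-1)).foldl (fun hh i =>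
        (((PySem.List.pyRange 0 n 1).map (fun j =>
            get2 ed i j + PySem.List.pyGetD (PySem.List.pyGetD hh 0 []) (j + 1) 0)) ++ [0]) :: hh)
        [List.replicate (n.toNat + 1) 0]) i j = estimate_cost doc1 doc2 i j := by
  intro i j hi0 him hj0 hjn
  have hm0 : 0 ≤ m := le_trans hi0 him
  obtain ⟨_, hpt⟩ := hh_aux doc1 doc2 m n ed hm hn hed m.toNat (by
    rw [Int.toNat_of_nonneg hm0])
  have hrange : PySem.List.pyRange (m - 1) (-1) (-1)
      = PySem.List.pyRange (m - 1) (m - 1 - ((m.toNat : Nat) : Int)) (-1) := by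
    congr 1
    rw [Int.toNat_of_nonneg hm0]; ring
  unfold get2
  rw [hrange]
  have := hpt i.toNat (by omega) j hj0 hjn
  rw [show ((i.toNat : Nat) : Int) = i from Int.toNat_of_nonneg hi0] at this
  rw [show m - ((m.toNat : Nat) : Int) + i = i by
    rw [Int.toNat_of_nonneg hm0]; ring] at this
  exact this

-- ---- initial states are coupled ----
theorem INV_init (m n : Int) (hm : 0 ≤ m) (hn : 0 ≤ n) :
    INV m n [(0, (0, 0, 0))] PySem.Set.empty (PySem.Dict.ofList [((0, 0), (0, 0))]) := by
  refine ⟨by decide, ?_, ?_, ?_⟩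
  · intro p hp
    simp [PySem.Set.empty, PySem.Set.contains] at hp
  · intro p _
    by_cases hp : p = (0, 0)
    · subst hp; decide
    · have hL : (PySem.Dict.ofList [(((0 : Int), (0 : Int)), ((0 : Int), (0 : Int)))]).get? p = none := by
        show (PySem.Dict.mk [((0, 0), (0, 0))]).get? p = none
        rw [PySem.Dict.get?_mk_cons]
        simp [Ne.symm hp, PySem.Dict.get?]
      have hR : nmin (liveL PySem.Set.empty [(0, (0, 0, 0))]) p = none := by
        simp [nmin, liveL, PySem.Set.empty, PySem.Set.contains, nodeOf, Ne.symm hp]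
      exact hL.trans hR.symm
  · intro e he
    simp only [List.mem_singleton] at he
    subst he
    exact ⟨le_refl 0, hm, le_refl 0, hn⟩

theorem pv_main : ∀ (doc1 doc2 : List String),
    align_sentences doc1 doc2 = align_sentences_alt doc1 doc2 := by
  intro doc1 doc2
  unfold align_sentences align_sentences_alt
  apply loop_eq doc1 doc2 _ _ _ _ rfl rfl
  · exact ed_spec doc1 doc2 _ _ rfl rfl
  · exact hh_spec doc1 doc2 _ _ _ rfl rfl (ed_spec doc1 doc2 _ _ rfl rfl)
  · exact INV_init _ _ (by simp [PySem.List.len_eq]) (by simp [PySem.List.len_eq])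

-- ===== VERDICT (by name: the statement is the Claim_ definition above) =====
theorem align_sentences_spec : Claim_equal_align_sentences := by
  intro doc1 doc2 _
  unfold Spec_align_sentences
  exact pv_main doc1 doc2
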